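-- pv_equiv track=rewrite | github.com/nilanjanajui/Operating-System | LAB/19.filealloc.py | simulate_linked
-- ===== SOURCE A (Python) =====
-- from typing import List, Tuple, Optional, Set
--
-- def simulate_linked(N: int, free_blocks: Set[int], files: List[Tuple[str, int]]) -> List[Tuple[str, str]]:
--     """Simulate linked allocation strategy."""
--     results = []
--     # Use sorted list for deterministic smallest block selection
--     available_blocks = sorted(free_blocks)
--
--     for name, size in files:
--         if len(available_blocks) >= size:
--             # Allocate smallest 'size' blocks
--             allocated = available_blocks[:size]
--
--             # Create chain string
--             chain = "->".join(str(b) for b in allocated)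
--             results.append((name, f"CHAIN {chain}"))
--
--             # Remove allocated blocks
--             available_blocks = available_blocks[size:]
--         else:
--             results.append((name, "FAIL"))
--
--     return results
-- ===== SOURCE B (Python) =====
-- def simulate_linked(N, free_blocks, files):
--     """Linked allocation: sort once, render each block label once, and walk a single
--     cursor through the label list instead of rebuilding the free list per file."""
--     blocks = sorted(free_blocks)
--     labels = [str(b) for b in blocks]
--     results = []
--     idx = 0
--     for name, size in files:
--         if size > len(labels) - idx:
--             results.append((name, "FAIL"))
--         else:
--             chunk = labels[idx:][:size]
--             idx += len(chunk)
--             results.append((name, "CHAIN " + "->".join(chunk)))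
--     return results
-- ===== Notes on version B (the rewrite author's own statement) =====
-- stated objective: alternative
-- what changed: B pre-renders every block's string label once after the single sort and then walks one advancing cursor over that label list (fail branch first, chunk taken from the suffix), instead of A's rebuilding the whole remaining block list by two slices and re-stringifying blocks per file.
import Mathlib
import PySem

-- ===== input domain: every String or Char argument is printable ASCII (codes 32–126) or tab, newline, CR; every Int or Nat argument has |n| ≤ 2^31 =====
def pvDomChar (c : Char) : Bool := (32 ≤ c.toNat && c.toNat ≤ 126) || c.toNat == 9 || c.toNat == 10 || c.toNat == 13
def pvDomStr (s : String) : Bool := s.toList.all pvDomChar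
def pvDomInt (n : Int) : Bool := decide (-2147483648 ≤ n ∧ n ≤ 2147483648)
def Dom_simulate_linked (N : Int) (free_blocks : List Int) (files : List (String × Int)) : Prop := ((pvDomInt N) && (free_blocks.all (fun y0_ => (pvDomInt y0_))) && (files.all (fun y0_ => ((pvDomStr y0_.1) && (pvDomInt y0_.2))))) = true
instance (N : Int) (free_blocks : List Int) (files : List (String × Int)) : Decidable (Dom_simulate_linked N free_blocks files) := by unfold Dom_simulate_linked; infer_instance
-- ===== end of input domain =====

-- B sorts once, pre-renders every block's string label, and walks one advancing cursor over
-- the label list instead of rebuilding the remaining block list per file (objective: alternative).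


-- ===== PORT A =====
-- one iteration of A's 'for name, size in files' loop; state = (results, available_blocks)
def pvAStep (st : List (String × String) × List Int) (f : String × Int) :
    List (String × String) × List Int :=
  if (st.2.length : Int) ≥ f.2 then
    (st.1 ++ [(f.1, "CHAIN " ++ PySem.Str.join "->"
        ((PySem.List.slice st.2 none (some f.2)).map PySem.Int.toStr))],
     PySem.List.slice st.2 (some f.2) none)
  else
    (st.1 ++ [(f.1, "FAIL")], st.2)

def simulate_linked (N : Int) (free_blocks : List Int) (files : List (String × Int)) : List (String × String) :=
  (files.foldl pvAStep ([], PySem.List.sorted free_blocks (fun x => x) false)).1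

-- ===== PORT B =====
-- one iteration of B's loop over the pre-rendered labels; state = (results, idx);
-- the fail branch comes first, the chunk is labels[idx:][:size], idx advances by its length
def pvBStep (labels : List String) (st : List (String × String) × Int) (f : String × Int) :
    List (String × String) × Int :=
  if f.2 > (labels.length : Int) - st.2 then
    (st.1 ++ [(f.1, "FAIL")], st.2)
  else
    let chunk := PySem.List.slice (PySem.List.slice labels (some st.2) none) none (some f.2)
    (st.1 ++ [(f.1, "CHAIN " ++ PySem.Str.join "->" chunk)], st.2 + (chunk.length : Int))

def simulate_linked_alt (N : Int) (free_blocks : List Int) (files : List (String × Int)) : List (String × String) :=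
  let labels := (PySem.List.sorted free_blocks (fun x => x) false).map PySem.Int.toStr
  (files.foldl (pvBStep labels) ([], 0)).1

-- ===== PRECONDITION & SPEC =====
def Spec_simulate_linked (N : Int) (free_blocks : List Int) (files : List (String × Int)) (out : List (String × String)) : Prop := out = simulate_linked_alt N free_blocks files
instance (N : Int) (free_blocks : List Int) (files : List (String × Int)) (out : List (String × String)) : Decidable (Spec_simulate_linked N free_blocks files out) := by unfold Spec_simulate_linked; infer_instance

-- ===== CLAIM =====
def Claim_equal_simulate_linked : Prop := ∀ (N : Int) (free_blocks : List Int) (files : List (String × Int)), Dom_simulate_linked N free_blocks files → Spec_simulate_linked N free_blocks files (simulate_linked N free_blocks files)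

-- ===== LEMMAS AND PROOFS =====

-- xs[:b] as a clamped take
lemma pv_slice_none_some {α : Type} (xs : List α) (b : Int) :
    PySem.List.slice xs none (some b) = xs.take (PySem.List.clampIdx xs.length b) := by
  simp [PySem.List.slice]

-- main invariant: A's remaining block list is the suffix of the sorted blocks at B's cursor
lemma pv_fold_eq (blocks : List Int) (files : List (String × Int))
    (res : List (String × String)) (idx : Int) (h0 : 0 ≤ idx) (h1 : idx ≤ (blocks.length : Int)) :
    (files.foldl pvAStep (res, blocks.drop idx.toNat)).1
      = (files.foldl (pvBStep (blocks.map PySem.Int.toStr)) (res, idx)).1 := by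
  induction files generalizing res idx with
  | nil => rfl
  | cons f fs ih =>
    obtain ⟨name, size⟩ := f
    have hlen : ((blocks.drop idx.toNat).length : Int) = (blocks.length : Int) - idx := by
      simp [List.length_drop]; omega
    have hmlen : ((blocks.map PySem.Int.toStr).length : Int) = (blocks.length : Int) := by
      simp
    simp only [List.foldl_cons, pvAStep, pvBStep, hlen, hmlen]
    by_cases hc : ((blocks.length : Int) - idx) ≥ size
    · have hc' : ¬ size > (blocks.length : Int) - idx := by omega
      simp only [hc, hc', if_pos, if_false]
      set k : Nat := PySem.List.clampIdx (blocks.drop idx.toNat).length size with hk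
      have hkle : k ≤ (blocks.drop idx.toNat).length := PySem.List.clampIdx_le _ _
      -- the allocated chunk's labels agree
      have ha : (PySem.List.slice (blocks.drop idx.toNat) none (some size)).map PySem.Int.toStr
          = PySem.List.slice
              (PySem.List.slice (blocks.map PySem.Int.toStr) (some idx) none) none (some size) := by
        rw [PySem.List.slice_from _ h0, ← List.map_drop,
          pv_slice_none_some, pv_slice_none_some, ← List.map_take]
        congr 2
        simp
      -- length of the allocated chunk is k
      have hb : (PySem.List.slice
            (PySem.List.slice (blocks.map PySem.Int.toStr) (some idx) none) none (some size)).length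
          = k := by
        rw [← ha, List.length_map, pv_slice_none_some, List.length_take, ← hk]
        omega
      -- A's new remaining list is the suffix at the advanced cursor
      have hrem : PySem.List.slice (blocks.drop idx.toNat) (some size) none
          = blocks.drop (idx + (k : Int)).toNat := by
        rw [PySem.List.slice_some_none, ← hk, List.drop_drop]
        congr 1
        omega
      rw [ha, hb, hrem]
      exact ih _ (idx + (k : Int)) (by omega) (by simp [List.length_drop] at hkle; omega)
    · have hc' : size > (blocks.length : Int) - idx := by omega
      simp only [hc, hc', if_pos, if_false]
      exact ih _ idx h0 h1

-- ===== VERDICT =====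
theorem simulate_linked_spec : Claim_equal_simulate_linked := by
  intro N free_blocks files _
  unfold Spec_simulate_linked simulate_linked simulate_linked_alt
  have := pv_fold_eq (PySem.List.sorted free_blocks (fun x => x) false) files [] 0
    (by omega) (by positivity)
  simpa using this
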